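-- pv_equiv track=rewrite | github.com/saorsa-labs/four-word-networking | generate_optimized_wordlist.py | calculate_min_prefix_lengths
-- ===== SOURCE A (Python) =====
-- def calculate_min_prefix_lengths(words):
--     """Calculate minimum prefix length needed to uniquely identify each word."""
--     word_to_min_prefix = {}
--
--     for word in words:
--         min_length = 1
--
--         while min_length <= len(word):
--             prefix = word[:min_length]
--             conflicts = [w for w in words if w != word and w.startswith(prefix)]
--
--             if not conflicts:
--                 word_to_min_prefix[word] = min_length
--                 break
--
--             min_length += 1
--
--         if word not in word_to_min_prefix:
--             word_to_min_prefix[word] = len(word)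
--
--     return word_to_min_prefix
-- ===== SOURCE B (Python) =====
-- def _lcp(a, b):
--     n = min(len(a), len(b))
--     i = 0
--     while i < n and a[i] == b[i]:
--         i += 1
--     return i
--
--
-- def calculate_min_prefix_lengths(words):
--     """Calculate minimum prefix length needed to uniquely identify each word."""
--     result = {}
--     for word in words:
--         if word in result:
--             continue
--         best = 0
--         for w in words:
--             if w != word:
--                 l = _lcp(word, w)
--                 if l > best:
--                     best = l
--         result[word] = min(len(word), best + 1)
--     return result
-- ===== Notes on version B (the rewrite author's own statement) =====
-- stated objective: faster
-- what changed: A grows the prefix one character at a time and rescans all words with startswith at every length; B computes, once per distinct word, the maximum longest-common-prefix length with the other words in a single pass and returns the closed form min(len(word), max_lcp + 1), also skipping duplicate words instead of recomputing them.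
import Mathlib
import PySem

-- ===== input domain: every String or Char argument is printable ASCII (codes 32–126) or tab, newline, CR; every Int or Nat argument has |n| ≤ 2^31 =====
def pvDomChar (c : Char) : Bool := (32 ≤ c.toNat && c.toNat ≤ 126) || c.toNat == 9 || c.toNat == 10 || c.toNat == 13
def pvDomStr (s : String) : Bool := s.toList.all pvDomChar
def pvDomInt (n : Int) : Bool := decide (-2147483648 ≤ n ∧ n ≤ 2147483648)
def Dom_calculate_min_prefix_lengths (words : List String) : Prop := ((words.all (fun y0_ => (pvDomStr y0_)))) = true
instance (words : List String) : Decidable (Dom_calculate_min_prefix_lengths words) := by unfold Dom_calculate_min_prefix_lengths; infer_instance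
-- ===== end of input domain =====

-- B replaces A's grow-the-prefix-and-rescan search by one longest-common-prefix pass per
-- distinct word and the closed form min(len(word), max_lcp + 1); identical return values.

-- ===== PORT A =====
-- the 'while min_length <= len(word)' loop of A; returns the min_length at which it breaks,
-- none if it never breaks (fuel = word length bounds the iterations, which A's condition also does)
def pvAWhile (words : List String) (word : String) (k : Nat) : Nat → Option Nat
  | 0 => none
  | fuel + 1 =>
    if (k : Int) ≤ PySem.Str.len word then
      let pre := PySem.Str.slice word none (some (k : Int))
      let conflicts := words.filter (fun w => decide (w ≠ word) && PySem.Str.startswith w pre)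
      if conflicts.isEmpty then some k
      else pvAWhile words word (k + 1) fuel
    else none

def calculate_min_prefix_lengths (words : List String) : List (String × Int) :=
  (words.foldl (fun d word =>
      let d1 := match pvAWhile words word 1 word.toList.length with
        | some k => d.insert word (k : Int)
        | none => d
      if d1.contains word then d1 else d1.insert word (PySem.Str.len word))
    (PySem.Dict.empty : PySem.Dict String Int)).items

-- ===== PORT B =====
-- _lcp: length of the longest common prefix of two strings
def pvLcp : List Char → List Char → Nat
  | a :: as, b :: bs => if a = b then pvLcp as bs + 1 else 0
  | _, _ => 0

def calculate_min_prefix_lengths_alt (words : List String) : List (String × Int) :=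
  (words.foldl (fun res word =>
      if res.contains word then res
      else
        let best := words.foldl (fun m w =>
          if w ≠ word then
            let l := pvLcp word.toList w.toList
            if m < l then l else m
          else m) 0
        res.insert word (min (PySem.Str.len word) ((best : Int) + 1)))
    (PySem.Dict.empty : PySem.Dict String Int)).items

-- ===== PRECONDITION & SPEC =====
def Spec_calculate_min_prefix_lengths (words : List String) (out : List (String × Int)) : Prop := out = calculate_min_prefix_lengths_alt words
instance (words : List String) (out : List (String × Int)) : Decidable (Spec_calculate_min_prefix_lengths words out) := by unfold Spec_calculate_min_prefix_lengths; infer_instance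

-- ===== CLAIM (what is proved, stated in full; the proofs are below) =====
def Claim_equal_calculate_min_prefix_lengths : Prop := ∀ (words : List String), Dom_calculate_min_prefix_lengths words → Spec_calculate_min_prefix_lengths words (calculate_min_prefix_lengths words)

-- ===== LEMMAS AND PROOFS =====

-- the inner running-max loop of B
def pvBest (words : List String) (word : String) : Nat :=
  words.foldl (fun m w =>
    if w ≠ word then
      let l := pvLcp word.toList w.toList
      if m < l then l else m
    else m) 0

-- the value both programs store for a word
def pvAns (words : List String) (word : String) : Int :=
  min (PySem.Str.len word) ((pvBest words word : Int) + 1)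

lemma pvLcp_prefix_iff (a : List Char) : ∀ (b : List Char) (k : Nat), k ≤ a.length →
    (a.take k <+: b ↔ k ≤ pvLcp a b) := by
  induction a with
  | nil =>
    intro b k hk
    have hk0 : k = 0 := Nat.le_zero.mp hk
    subst hk0
    simp
  | cons x as ih =>
    intro b k hk
    match k, b with
    | 0, b => simp
    | k + 1, [] =>
      simp only [List.take_succ_cons]
      constructor
      · intro h; exact absurd (List.IsPrefix.length_le h) (by simp)
      · intro h; simp [pvLcp] at h
    | k + 1, y :: bs =>
      have hk' : k ≤ as.length := by simpa using hk
      simp only [List.take_succ_cons, List.cons_prefix_cons, pvLcp]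
      by_cases hxy : x = y
      · subst hxy
        rw [if_pos rfl]
        constructor
        · rintro ⟨-, hp⟩
          have := (ih bs k hk').1 hp
          omega
        · intro h
          exact ⟨rfl, (ih bs k hk').2 (by omega)⟩
      · rw [if_neg hxy]
        constructor
        · rintro ⟨h, -⟩; exact absurd h hxy
        · intro h; omega

-- generic running-max fold, 'if m < g w then g w else m' under a filter p
lemma pvFoldMax_ub {α : Type} (p : α → Prop) [DecidablePred p] (g : α → Nat) (l : List α) :
    ∀ init, init ≤ l.foldl (fun m w => if p w then (if m < g w then g w else m) else m) init ∧
      ∀ w ∈ l, p w → g w ≤ l.foldl (fun m w => if p w then (if m < g w then g w else m) else m) init := by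
  induction l with
  | nil => simp
  | cons x xs ih =>
    intro init
    rw [List.foldl_cons]
    refine ⟨le_trans ?_ (ih _).1, ?_⟩
    · split_ifs <;> omega
    · intro w hw hpw
      rcases List.mem_cons.mp hw with rfl | hw'
      · refine le_trans ?_ (ih _).1
        rw [if_pos hpw]
        split_ifs <;> omega
      · exact (ih _).2 w hw' hpw
    
lemma pvFoldMax_attained {α : Type} (p : α → Prop) [DecidablePred p] (g : α → Nat) (l : List α) :
    ∀ init, l.foldl (fun m w => if p w then (if m < g w then g w else m) else m) init = init ∨
      ∃ w ∈ l, p w ∧ l.foldl (fun m w => if p w then (if m < g w then g w else m) else m) init = g w := by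
  induction l with
  | nil => simp
  | cons x xs ih =>
    intro init
    rw [List.foldl_cons]
    by_cases hpx : p x
    · by_cases hlt : init < g x
      · rw [if_pos hpx, if_pos hlt]
        rcases ih (g x) with h | ⟨w, hw, hpw, hval⟩
        · exact Or.inr ⟨x, List.mem_cons_self, hpx, h⟩
        · exact Or.inr ⟨w, List.mem_cons_of_mem _ hw, hpw, hval⟩
      · rw [if_pos hpx, if_neg hlt]
        rcases ih init with h | ⟨w, hw, hpw, hval⟩
        · exact Or.inl h
        · exact Or.inr ⟨w, List.mem_cons_of_mem _ hw, hpw, hval⟩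
    · rw [if_neg hpx]
      rcases ih init with h | ⟨w, hw, hpw, hval⟩
      · exact Or.inl h
      · exact Or.inr ⟨w, List.mem_cons_of_mem _ hw, hpw, hval⟩

-- B's inner loop written as the generic running-max fold
lemma pvBest_eq_foldMax (words : List String) (word : String) :
    pvBest words word = words.foldl (fun m w => if w ≠ word then
      (if m < pvLcp word.toList w.toList then pvLcp word.toList w.toList else m) else m) 0 := rfl

lemma pvBest_ub (words : List String) (word : String) :
    ∀ w ∈ words, w ≠ word → pvLcp word.toList w.toList ≤ pvBest words word := by
  rw [pvBest_eq_foldMax]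
  exact (pvFoldMax_ub (fun w => w ≠ word) (fun w => pvLcp word.toList w.toList) words 0).2

lemma pvBest_attained (words : List String) (word : String) :
    pvBest words word = 0 ∨
      ∃ w ∈ words, w ≠ word ∧ pvBest words word = pvLcp word.toList w.toList := by
  rw [pvBest_eq_foldMax]
  exact pvFoldMax_attained (fun w => w ≠ word) (fun w => pvLcp word.toList w.toList) words 0

-- A's conflict test at prefix length k is exactly 'pvBest ≥ k'
lemma conflicts_empty_iff (words : List String) (word : String) (k : Nat)
    (h1 : 1 ≤ k) (hk : k ≤ word.toList.length) :
    (words.filter (fun w => decide (w ≠ word) &&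
        PySem.Str.startswith w (PySem.Str.slice word none (some (k : Int))))).isEmpty = true
      ↔ pvBest words word < k := by
  rw [List.isEmpty_iff, List.filter_eq_nil_iff]
  have hpre : ∀ w : String,
      (PySem.Str.startswith w (PySem.Str.slice word none (some (k : Int))) = true)
        ↔ k ≤ pvLcp word.toList w.toList := by
    intro w
    have hts : (PySem.Str.slice word none (some (k : Int))).toList = word.toList.take k := by
      simp [PySem.List.slice_to_natCast]
    have hsw : PySem.Str.startswith w (PySem.Str.slice word none (some (k : Int)))
        = PySem.Chars.startswith w.toList (word.toList.take k) := by
      rw [← hts]; simp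
    rw [hsw, PySem.Chars.startswith_iff]
    exact pvLcp_prefix_iff word.toList w.toList k hk
  constructor
  · intro h
    by_contra hlt
    rcases pvBest_attained words word with h0 | ⟨w, hw, hwne, hval⟩
    · omega
    · have := h w hw
      simp only [Bool.and_eq_true, decide_eq_true_eq, not_and] at this
      exact absurd ((hpre w).2 (by omega)) (by simpa using this hwne)
  · intro hlt w hw
    simp only [Bool.and_eq_true, decide_eq_true_eq, not_and]
    intro hwne hsw
    have h1' := pvBest_ub words word w hw hwne
    have h2' := (hpre w).1 hsw
    omega

-- full characterisation of A's while loop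
lemma pvAWhile_eq (words : List String) (word : String) :
    ∀ (fuel k : Nat), 1 ≤ k → word.toList.length + 1 ≤ k + fuel →
    pvAWhile words word k fuel =
      (if max k (pvBest words word + 1) ≤ word.toList.length
        then some (max k (pvBest words word + 1)) else none) := by
  have hlen : PySem.Str.len word = (word.toList.length : Int) := by simp
  intro fuel
  induction fuel with
  | zero =>
    intro k h1 hf
    simp only [pvAWhile]
    rw [if_neg (by omega)]
  | succ fuel ih =>
    intro k h1 hf
    simp only [pvAWhile]
    by_cases hk : k ≤ word.toList.length
    · rw [if_pos (by rw [hlen]; exact_mod_cast hk)]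
      by_cases hc : pvBest words word < k
      · rw [if_pos ((conflicts_empty_iff words word k h1 hk).2 hc)]
        rw [if_pos (by omega), Nat.max_eq_left (by omega)]
      · rw [if_neg (by
          intro h
          exact hc ((conflicts_empty_iff words word k h1 hk).1 h))]
        rw [ih (k + 1) (by omega) (by omega)]
        have hm : max (k + 1) (pvBest words word + 1) = max k (pvBest words word + 1) := by omega
        rw [hm]
    · rw [if_neg (by rw [hlen]; exact_mod_cast hk), if_neg (by omega)]

-- re-inserting the value a key already holds does not change a dict
lemma insert_mem_self {d : PySem.Dict String Int} {k : String} {v : Int}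
    (hnd : d.keys.Nodup) (hmem : (k, v) ∈ d.items) : d.insert k v = d := by
  apply PySem.Dict.ext
  rw [PySem.Dict.items_insert_of_contains d v
    ((PySem.Dict.contains_iff_mem_keys d k).2 (PySem.Dict.mem_keys_of_mem_items d hmem))]
  have : ∀ p ∈ d.items, (if (p.1 == k) = true then (k, v) else p) = p := by
    rintro ⟨pk, pv⟩ hp
    by_cases hpk : pk = k
    · subst hpk
      have h1 : d.get? pk = some v := PySem.Dict.get?_of_mem_items d hmem hnd
      have h2 : d.get? pk = some pv := PySem.Dict.get?_of_mem_items d hp hnd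
      rw [h1] at h2
      simp only [beq_self_eq_true, if_pos]
      rw [Option.some_inj.mp h2]
    · simp [hpk]
  calc List.map (fun p => if (p.1 == k) = true then (k, v) else p) d.items
      = List.map id d.items := List.map_congr_left (by intro p hp; rw [this p hp]; rfl)
    _ = d.items := List.map_id d.items

-- the two folds agree from any dict whose entries already hold the canonical values
lemma fold_eq (words : List String) :
    ∀ (l : List String) (d : PySem.Dict String Int),
      d.keys.Nodup → (∀ p ∈ d.items, p.2 = pvAns words p.1) →
      l.foldl (fun d word =>
        let d1 := match pvAWhile words word 1 word.toList.length with
          | some k => d.insert word (k : Int)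
          | none => d
        if d1.contains word then d1 else d1.insert word (PySem.Str.len word)) d
      = l.foldl (fun res word =>
        if res.contains word then res
        else
          let best := words.foldl (fun m w =>
            if w ≠ word then
              let l := pvLcp word.toList w.toList
              if m < l then l else m
            else m) 0
          res.insert word (min (PySem.Str.len word) ((best : Int) + 1))) d := by
  intro l
  induction l with
  | nil => intro d _ _; rfl
  | cons word rest ih =>
    intro d hnd hinv
    simp only [List.foldl_cons]
    have hlen : PySem.Str.len word = (word.toList.length : Int) := by simp
    have hW : pvAWhile words word 1 word.toList.length =
        (if pvBest words word + 1 ≤ word.toList.length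
          then some (pvBest words word + 1) else none) := by
      rw [pvAWhile_eq words word word.toList.length 1 (by omega) (by omega)]
      have hm : max 1 (pvBest words word + 1) = pvBest words word + 1 := by omega
      rw [hm]
    -- A's one step is: keep the dict if the key is present, else record pvAns
    have hA : (let d1 := match pvAWhile words word 1 word.toList.length with
          | some k => d.insert word (k : Int)
          | none => d
        if d1.contains word then d1 else d1.insert word (PySem.Str.len word))
        = (if d.contains word then d else d.insert word (pvAns words word)) := by
      by_cases hle : pvBest words word + 1 ≤ word.toList.length
      · rw [hW, if_pos hle]
        simp only
        rw [if_pos (PySem.Dict.contains_insert_self d word _)]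
        have hval : ((pvBest words word + 1 : Nat) : Int) = pvAns words word := by
          unfold pvAns
          rw [hlen]
          push_cast
          omega
        rw [hval]
        by_cases hcont : d.contains word = true
        · rw [if_pos hcont]
          have hg := hcont
          rw [PySem.Dict.contains_eq_isSome_get?] at hg
          obtain ⟨v, hv⟩ := Option.isSome_iff_exists.mp hg
          have hmem := PySem.Dict.mem_items_of_get?_eq_some d hv
          have hval2 := hinv _ hmem
          simp only at hval2
          rw [← hval2]
          exact insert_mem_self hnd hmem
        · rw [if_neg hcont]
      · rw [hW, if_neg hle]
        simp only
        have hval : PySem.Str.len word = pvAns words word := by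
          unfold pvAns
          rw [hlen]
          omega
        rw [hval]
    have hB : (if d.contains word then d
        else
          let best := words.foldl (fun m w =>
            if w ≠ word then
              let l := pvLcp word.toList w.toList
              if m < l then l else m
            else m) 0
          d.insert word (min (PySem.Str.len word) ((best : Int) + 1)))
        = (if d.contains word then d else d.insert word (pvAns words word)) := rfl
    rw [hA, hB]
    -- the updated dict still satisfies the invariant
    by_cases hcont : d.contains word = true
    · rw [if_pos hcont]
      exact ih d hnd hinv
    · rw [if_neg hcont]
      refine ih _ (PySem.Dict.nodup_keys_insert d word _ hnd) ?_
      intro p hp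
      rcases (PySem.Dict.mem_items_insert d word (pvAns words word) p).1 hp with rfl | ⟨hpd, -⟩
      · rfl
      · exact hinv p hpd

-- ===== VERDICT (by name: the statement is the Claim_ definition above) =====
theorem calculate_min_prefix_lengths_spec : Claim_equal_calculate_min_prefix_lengths := by
  intro words _
  unfold Spec_calculate_min_prefix_lengths calculate_min_prefix_lengths calculate_min_prefix_lengths_alt
  congr 1
  exact fold_eq words words PySem.Dict.empty
    (by simp [show (PySem.Dict.empty : PySem.Dict String Int).keys = [] from rfl])
    (by intro p hp; exact absurd (show p ∈ ([] : List (String × Int)) from hp) (by simp))
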